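-- pv_equiv track=rewrite | github.com/sqoshi/python-course | List01/Task10.py | getEmptyGraph
-- ===== SOURCE A (Python) =====
-- from math import floor, pi, sin, cos, tan
--
-- def getEmptyGraph(g, s):
--     for i in range(len(g)):
--         for j in range(len(g[i])):
--             if g[i][j] != '*':
--                 if j == s:
--                     g[i][j] = '|'
--                     if i == 0:
--                         g[i][j] = '^'
--                 if i == floor(len(g) / 2):
--                     g[i][j] = '-'
--                     if j == floor(len(g[i]) - 1):
--                         g[i][j] = '>'
--                 if i == floor(len(g) / 2) and j == s:
--                     g[i][j] = '+'
--     return g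
-- ===== SOURCE B (Python) =====
-- def getEmptyGraph(g, s):
--     # B: touch only column s and the middle row directly (O(n+m) writes),
--     # mutating g in place like A and returning it.
--     n = len(g)
--     for i in range(n):
--         row = g[i]
--         if 0 <= s < len(row) and row[s] != '*':
--             row[s] = '^' if i == 0 else '|'
--     if n > 0:
--         row = g[n // 2]
--         m = len(row)
--         for j in range(m):
--             if row[j] != '*':
--                 row[j] = '>' if j == m - 1 else '-'
--         if 0 <= s < m and row[s] != '*':
--             row[s] = '+'
--     return g
-- ===== Notes on version B (the rewrite author's own statement) =====
-- stated objective: faster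
-- what changed: Instead of scanning every cell of the grid with nested loops, B writes the markers directly: one pass down column s (one cell per row) plus one pass over the middle row, preserving A's override order ('+' over '-'/'>' over '|'/'^').
import Mathlib
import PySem

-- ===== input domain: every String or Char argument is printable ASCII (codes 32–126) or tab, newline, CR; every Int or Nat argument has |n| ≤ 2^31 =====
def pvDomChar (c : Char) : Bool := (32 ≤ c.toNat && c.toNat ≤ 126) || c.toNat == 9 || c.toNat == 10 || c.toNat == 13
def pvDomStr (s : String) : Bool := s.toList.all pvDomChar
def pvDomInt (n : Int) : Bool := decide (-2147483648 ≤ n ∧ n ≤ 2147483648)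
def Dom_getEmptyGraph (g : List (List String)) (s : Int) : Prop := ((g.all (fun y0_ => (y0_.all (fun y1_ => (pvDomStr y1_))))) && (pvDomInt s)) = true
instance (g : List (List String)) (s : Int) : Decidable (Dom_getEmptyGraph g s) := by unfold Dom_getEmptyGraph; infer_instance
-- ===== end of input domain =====

-- B replaces A's full O(n*m) cell scan with direct writes to column s and the middle
-- row only (O(n+m)); both Pythons mutate g in place and the final state equals the
-- returned value, so the return-value equivalence proved here covers the mutation too.


-- ===== PORT A =====
-- g[i][j] = v  (indices are in range whenever reached, so getD/set are exact)
def set2 (g : List (List String)) (i j : Nat) (v : String) : List (List String) :=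
  g.set i ((g.getD i []).set j v)

-- the body of A's inner loop, acting on the whole grid; n = len(g) (constant in Python)
def stepCell (n : Nat) (s : Int) (i j : Nat) (g : List (List String)) : List (List String) :=
  if (g.getD i []).getD j "" ≠ "*" then
    let g1 := if (j : Int) = s then
                (let ga := set2 g i j "|"
                 if i = 0 then set2 ga i j "^" else ga)
              else g
    let g2 := if i = n / 2 then
                (let gb := set2 g1 i j "-"
                 if j = (g1.getD i []).length - 1 then set2 gb i j ">" else gb)
              else g1
    if i = n / 2 ∧ (j : Int) = s then set2 g2 i j "+" else g2
  else g

def getEmptyGraph (g : List (List String)) (s : Int) : List (List String) :=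
  (List.range g.length).foldl
    (fun gi i =>
      (List.range (gi.getD i []).length).foldl (fun gj j => stepCell g.length s i j gj) gi)
    g

-- ===== PORT B =====
-- one write into column s of row i (if in range and not '*')
def colMark (i : Nat) (s : Int) (row : List String) : List String :=
  if 0 ≤ s ∧ s < (row.length : Int) ∧ row.getD s.toNat "" ≠ "*" then
    row.set s.toNat (if i = 0 then "^" else "|")
  else row

-- the middle-row pass: '-' everywhere not '*', '>' at the end
def midRow (row : List String) : List String :=
  row.mapIdx (fun j c => if c ≠ "*" then (if j = row.length - 1 then ">" else "-") else c)

def getEmptyGraph_alt (g : List (List String)) (s : Int) : List (List String) :=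
  let n := g.length
  let g1 := g.mapIdx (fun i row => colMark i s row)
  if n > 0 then
    let row := g1.getD (n / 2) []
    let row2 := midRow row
    let row3 := if 0 ≤ s ∧ s < (row2.length : Int) ∧ row2.getD s.toNat "" ≠ "*" then
                  row2.set s.toNat "+"
                else row2
    g1.set (n / 2) row3
  else g1

-- ===== PRECONDITION & SPEC =====
def Spec_getEmptyGraph (g : List (List String)) (s : Int) (out : List (List String)) : Prop := out = getEmptyGraph_alt g s
instance (g : List (List String)) (s : Int) (out : List (List String)) : Decidable (Spec_getEmptyGraph g s out) := by unfold Spec_getEmptyGraph; infer_instance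

-- ===== CLAIM (what is proved, stated in full; the proofs are below) =====
def Claim_equal_getEmptyGraph : Prop := ∀ (g : List (List String)) (s : Int), Dom_getEmptyGraph g s → Spec_getEmptyGraph g s (getEmptyGraph g s)

-- ===== LEMMAS AND PROOFS =====

-- the final value of cell (i,j) (c its original value, n the grid height, m the row width)
def cellF (n : Nat) (s : Int) (i m j : Nat) (c : String) : String :=
  if c = "*" then c
  else if i = n / 2 ∧ (j : Int) = s then "+"
  else if i = n / 2 then (if j = m - 1 then ">" else "-")
  else if (j : Int) = s then (if i = 0 then "^" else "|")
  else c

def specG (g : List (List String)) (s : Int) : List (List String) :=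
  g.mapIdx (fun i row => row.mapIdx (fun j c => cellF g.length s i row.length j c))

theorem pv_fold_set_range {α : Type} (G : Nat → α → α) (d : α) :
    ∀ (k : Nat) (l : List α),
      (List.range k).foldl (fun r j => r.set j (G j (r.getD j d))) l
        = l.mapIdx (fun j c => if j < k then G j c else c) := by
  intro k
  induction k with
  | zero =>
      intro l
      apply List.ext_getElem (by simp)
      intro i h1 h2; simp
  | succ k ih =>
      intro l
      rw [List.range_succ, List.foldl_append, ih]
      apply List.ext_getElem (by simp)
      intro i h1 h2
      simp only [List.foldl_cons, List.foldl_nil, List.getElem_set, List.getElem_mapIdx]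
      have hil : i < l.length := by simpa using h2
      by_cases hik : k = i
      · subst hik
        simp only [List.getD_eq_getElem?_getD]
        simp [hil]
      · simp only [if_neg hik]
        by_cases hlt : i < k
        · rw [if_pos hlt, if_pos (by omega)]
        · rw [if_neg hlt, if_neg (by omega)]

-- removing the trivial guard of pv_fold_set_range at k = l.length
theorem pv_mapIdx_guard {α : Type} (G : Nat → α → α) (l : List α) :
    l.mapIdx (fun j c => if j < l.length then G j c else c) = l.mapIdx G := by
  apply List.ext_getElem (by simp)
  intro i h1 h2
  simp only [List.getElem_mapIdx]
  rw [if_pos (by simpa using h2)]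

-- one step of A's inner loop only rewrites cell (i,j)
theorem pv_getD_set_self {α : Type} (g : List α) (i : Nat) (r d : α) (h : i < g.length) :
    (g.set i r).getD i d = r := by
  simp [List.getD_eq_getElem?_getD, h]

theorem pv_stepCell_eq (n : Nat) (s : Int) (i j : Nat) (g : List (List String)) :
    stepCell n s i j g
      = g.set i ((g.getD i []).set j
          (cellF n s i (g.getD i []).length j ((g.getD i []).getD j ""))) := by
  by_cases hi : i < g.length
  · have hrow : g.getD i [] = g[i] := by simp [List.getD_eq_getElem?_getD, hi]
    have hg : ∀ r : List String, (g.set i r).getD i [] = r :=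
      fun r => pv_getD_set_self g i r [] hi
    by_cases hj : j < (g[i]'hi).length
    · have hc : (g[i]'hi).getD j "" = (g[i]'hi)[j] := by
        simp [List.getD_eq_getElem?_getD, hj]
      by_cases hstar : (g[i]'hi)[j] = "*"
      · rw [stepCell, if_neg (by rw [hrow, hc]; simpa using hstar)]
        rw [hrow, hc, cellF, if_pos hstar]
        rw [List.set_getElem_self hj, List.set_getElem_self hi]
      · rw [stepCell, if_pos (by rw [hrow, hc]; simpa using hstar)]
        simp only [set2, hrow, hc, hg, List.set_set, List.length_set, cellF, if_neg hstar]
        split_ifs <;>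
          (try simp only [hg, hrow, hc, List.set_set, List.length_set] at *) <;>
          first
          | rfl
          | (rw [List.set_getElem_self hj, List.set_getElem_self hi])
          | tauto
          | omega
    · have hj' : (g[i]'hi).length ≤ j := Nat.le_of_not_lt hj
      have hset : ∀ v, (g[i]'hi).set j v = g[i] := fun v => List.set_eq_of_length_le hj'
      have hgd : (g[i]'hi).getD j "" = "" := by
        simp [List.getD_eq_getElem?_getD, List.getElem?_eq_none hj']
      rw [stepCell, if_pos (by rw [hrow, hgd]; decide)]
      simp only [set2, hrow]
      split_ifs <;> simp only [hg, hrow, hset, List.set_set] <;>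
        first
        | rfl
        | (rw [List.set_getElem_self hi])
        | tauto
  · have hi' : g.length ≤ i := Nat.le_of_not_lt hi
    have hrow : g.getD i [] = ([] : List String) := by
      simp [List.getD_eq_getElem?_getD, List.getElem?_eq_none hi']
    simp [stepCell, set2, hrow, List.set_eq_of_length_le hi',
      show ¬(("":String) = "*") from by decide]

-- A's inner loop lifted to a row computation
theorem pv_set_getD_self (g : List (List String)) (i : Nat) :
    g.set i (g.getD i []) = g := by
  by_cases hi : i < g.length
  · rw [show g.getD i [] = g[i] from by simp [List.getD_eq_getElem?_getD, hi],
      List.set_getElem_self hi]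
  · exact List.set_eq_of_length_le (Nat.le_of_not_lt hi)

theorem pv_lift_fold (n : Nat) (s : Int) (i : Nat) :
    ∀ (L : List Nat) (g : List (List String)),
      L.foldl (fun gj j => stepCell n s i j gj) g
        = g.set i (L.foldl
            (fun r j => r.set j (cellF n s i r.length j (r.getD j ""))) (g.getD i [])) := by
  intro L
  induction L with
  | nil => intro g; simp only [List.foldl_nil]; exact (pv_set_getD_self g i).symm
  | cons j L ih =>
      intro g
      simp only [List.foldl_cons]
      rw [ih, pv_stepCell_eq]
      have hD : (g.set i ((g.getD i []).set j
            (cellF n s i (g.getD i []).length j ((g.getD i []).getD j "")))).getD i []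
          = (g.getD i []).set j (cellF n s i (g.getD i []).length j ((g.getD i []).getD j "")) := by
        by_cases hi : i < g.length
        · exact pv_getD_set_self _ _ _ _ hi
        · have h1 : g.getD i [] = ([] : List String) := by
            simp [List.getD_eq_getElem?_getD, List.getElem?_eq_none (Nat.le_of_not_lt hi)]
          rw [h1]
          simp only [List.set_nil]
          rw [List.set_eq_of_length_le (Nat.le_of_not_lt hi)]
          exact h1
      rw [hD, List.set_set]

-- the row fold may fix its width parameter
theorem pv_row_fold_congr (n : Nat) (s : Int) (i m : Nat) :
    ∀ (L : List Nat) (r : List String), r.length = m →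
      L.foldl (fun r j => r.set j (cellF n s i r.length j (r.getD j ""))) r
        = L.foldl (fun r j => r.set j (cellF n s i m j (r.getD j ""))) r := by
  intro L
  induction L with
  | nil => intro r _; rfl
  | cons j L ih =>
      intro r hm
      simp only [List.foldl_cons]
      rw [hm, ih _ (by simp [hm])]

-- Port A computes the pointwise description specG
theorem pv_A_eq_spec (g : List (List String)) (s : Int) :
    getEmptyGraph g s = specG g s := by
  unfold getEmptyGraph
  have hstep : (fun (gi : List (List String)) (i : Nat) =>
        (List.range (gi.getD i []).length).foldl (fun gj j => stepCell g.length s i j gj) gi)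
      = fun gi i => gi.set i
          ((gi.getD i []).mapIdx (fun j c => cellF g.length s i (gi.getD i []).length j c)) := by
    funext gi i
    rw [pv_lift_fold]
    congr 1
    rw [pv_row_fold_congr g.length s i (gi.getD i []).length _ _ rfl]
    rw [pv_fold_set_range (fun j c => cellF g.length s i (gi.getD i []).length j c) ""]
    exact pv_mapIdx_guard _ _
  rw [hstep]
  rw [pv_fold_set_range
    (fun i row => row.mapIdx (fun j c => cellF g.length s i row.length j c)) [] g.length g]
  rw [pv_mapIdx_guard (fun i row => row.mapIdx (fun j c => cellF g.length s i row.length j c)) g]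
  rfl

theorem pv_colMark_length (i : Nat) (s : Int) (row : List String) :
    (colMark i s row).length = row.length := by
  unfold colMark; split_ifs <;> simp

theorem pv_getD_lt {α : Type} (l : List α) (j : Nat) (d : α) (h : j < l.length) :
    l.getD j d = l[j] := by simp [List.getD_eq_getElem?_getD, h]

theorem pv_colMark_getD (i : Nat) (s : Int) (row : List String) (j : Nat)
    (h : j < row.length) :
    (colMark i s row).getD j ""
      = if (j : Int) = s ∧ row[j] ≠ "*" then (if i = 0 then "^" else "|") else row[j] := by
  unfold colMark
  by_cases hjs : (j : Int) = s
  · have hs0 : 0 ≤ s := hjs ▸ Int.natCast_nonneg j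
    have htn : s.toNat = j := by omega
    by_cases hstar : row[j] = "*"
    · have hC1 : ¬(0 ≤ s ∧ s < (row.length : Int) ∧ row.getD s.toNat "" ≠ "*") := by
        rw [htn, pv_getD_lt _ _ _ h]; tauto
      rw [if_neg hC1, if_neg (show ¬((j : Int) = s ∧ row[j] ≠ "*") by tauto)]
      exact pv_getD_lt _ _ _ h
    · have hC1 : 0 ≤ s ∧ s < (row.length : Int) ∧ row.getD s.toNat "" ≠ "*" := by
        refine ⟨hs0, by omega, ?_⟩
        rw [htn, pv_getD_lt _ _ _ h]; simpa using hstar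
      have hC2 : (j : Int) = s ∧ row[j] ≠ "*" := ⟨hjs, hstar⟩
      rw [if_pos hC1, if_pos hC2, htn,
        pv_getD_lt _ _ _ (by simpa using h), List.getElem_set_self (by simpa using h)]
  · have hC2 : ¬((j : Int) = s ∧ row[j] ≠ "*") := by tauto
    rw [if_neg hC2]
    by_cases hC1 : 0 ≤ s ∧ s < (row.length : Int) ∧ row.getD s.toNat "" ≠ "*"
    · rw [if_pos hC1, pv_getD_lt _ _ _ (by simpa using h),
        List.getElem_set_ne (show s.toNat ≠ j by omega) _]
    · rw [if_neg hC1]; exact pv_getD_lt _ _ _ h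

theorem pv_midRow_length (row : List String) : (midRow row).length = row.length := by
  simp [midRow]

theorem pv_midRow_getD (row : List String) (j : Nat) (h : j < row.length) :
    (midRow row).getD j ""
      = if row[j] ≠ "*" then (if j = row.length - 1 then ">" else "-") else row[j] := by
  rw [pv_getD_lt _ _ _ (by simpa [pv_midRow_length] using h)]
  simp [midRow]

theorem pv_colMark_row (n : Nat) (s : Int) (i : Nat) (row : List String) (hi : i ≠ n / 2) :
    colMark i s row = row.mapIdx (fun j c => cellF n s i row.length j c) := by
  apply List.ext_getElem (by simp [pv_colMark_length])
  intro j h1 h2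
  have hj : j < row.length := by simpa [pv_colMark_length] using h1
  have hcm := pv_colMark_getD i s row j hj
  rw [pv_getD_lt _ _ _ h1] at hcm
  rw [hcm, List.getElem_mapIdx]
  unfold cellF
  by_cases hstar : row[j] = "*" <;> by_cases hjs : (j : Int) = s <;>
    simp [hstar, hjs, hi]

theorem pv_mid_row (n : Nat) (s : Int) (r0 : List String) :
    (if 0 ≤ s ∧ s < ((midRow (colMark (n / 2) s r0)).length : Int) ∧
        (midRow (colMark (n / 2) s r0)).getD s.toNat "" ≠ "*"
     then (midRow (colMark (n / 2) s r0)).set s.toNat "+"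
     else midRow (colMark (n / 2) s r0))
      = r0.mapIdx (fun j c => cellF n s (n / 2) r0.length j c) := by
  have hl1 : (colMark (n / 2) s r0).length = r0.length := pv_colMark_length _ _ _
  have hl2 : (midRow (colMark (n / 2) s r0)).length = r0.length := by
    rw [pv_midRow_length, hl1]
  -- the value of the middle row before the '+' write
  have hget2 : ∀ j, (hj : j < r0.length) →
      (midRow (colMark (n / 2) s r0))[j]'(by omega)
        = if r0[j] ≠ "*" then (if j = r0.length - 1 then ">" else "-") else r0[j] := by
    intro j hj
    have h2 := pv_midRow_getD (colMark (n / 2) s r0) j (by omega)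
    rw [pv_getD_lt _ _ _ (by omega)] at h2
    have h1 := pv_colMark_getD (n / 2) s r0 j hj
    rw [pv_getD_lt _ _ _ (by omega)] at h1
    rw [h2, h1, hl1]
    by_cases hstar : r0[j] = "*" <;> by_cases hjs : (j : Int) = s <;>
      simp [hstar, hjs] <;>
      (intro habs; exact absurd habs (by split_ifs <;> decide))
  -- the '+' guard in terms of the original row
  have hC : (0 ≤ s ∧ s < ((midRow (colMark (n / 2) s r0)).length : Int) ∧
        (midRow (colMark (n / 2) s r0)).getD s.toNat "" ≠ "*")
      ↔ (0 ≤ s ∧ s < (r0.length : Int) ∧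
          ∀ h : s.toNat < r0.length, r0[s.toNat]'h ≠ "*") := by
    rw [hl2]
    constructor
    · rintro ⟨h0, h1', h2'⟩
      refine ⟨h0, h1', fun hlt => ?_⟩
      rw [pv_getD_lt _ _ _ (by omega), hget2 _ hlt] at h2'
      intro hc
      rw [if_neg (by simpa using hc)] at h2'
      exact h2' hc
    · rintro ⟨h0, h1', h2'⟩
      have hlt : s.toNat < r0.length := by omega
      refine ⟨h0, h1', ?_⟩
      rw [pv_getD_lt _ _ _ (by omega), hget2 _ hlt, if_pos (by simpa using h2' hlt)]
      split_ifs <;> decide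
  apply List.ext_getElem (by split_ifs <;> simp [hl2])
  intro j h1 h2
  have hj : j < r0.length := by simpa using h2
  rw [List.getElem_mapIdx, ← pv_getD_lt _ j "" h1]
  by_cases hC' : (0 ≤ s ∧ s < ((midRow (colMark (n / 2) s r0)).length : Int) ∧
      (midRow (colMark (n / 2) s r0)).getD s.toNat "" ≠ "*")
  · rw [if_pos hC']
    obtain ⟨h0, hsl, hsv⟩ := hC.mp hC'
    have hjlt : s.toNat < r0.length := by omega
    have hsv' := hsv hjlt
    by_cases hjs : j = s.toNat
    · subst hjs
      rw [pv_getD_lt _ _ _ (by simpa [hl2] using hj), List.getElem_set_self (by simp only [List.length_set, hl2]; exact hjlt)]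
      unfold cellF
      rw [if_neg (by simpa using hsv'), if_pos ⟨rfl, by omega⟩]
    · rw [pv_getD_lt _ _ _ (by simpa [hl2] using hj),
        List.getElem_set_ne (by omega) _, hget2 j hj]
      have hjs' : ¬((j : Int) = s) := by omega
      unfold cellF
      by_cases hstar : r0[j] = "*" <;> simp [hstar, hjs']
  · rw [if_neg hC']
    rw [pv_getD_lt _ _ _ (by rw [hl2]; exact hj), hget2 j hj]
    have hns : ¬((j : Int) = s ∧ r0[j] ≠ "*") := by
      rintro ⟨hjs, hstar⟩
      apply hC'
      apply hC.mpr
      refine ⟨by omega, by omega, fun hlt => ?_⟩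
      have hsj : s.toNat = j := by omega
      simp only [hsj]
      exact hstar
    unfold cellF
    by_cases hstar : r0[j] = "*" <;> simp [hstar] <;> tauto

-- Port B computes the pointwise description specG
theorem pv_B_eq_spec (g : List (List String)) (s : Int) :
    getEmptyGraph_alt g s = specG g s := by
  by_cases hg : g.length = 0
  · have hnil : g = [] := List.length_eq_zero_iff.mp hg
    subst hnil; rfl
  · have h0 : 0 < g.length := Nat.pos_of_ne_zero hg
    have hmid : g.length / 2 < g.length := Nat.div_lt_self h0 (by norm_num)
    simp only [getEmptyGraph_alt]
    rw [if_pos h0]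
    have hg1 : (g.mapIdx (fun i row => colMark i s row)).getD (g.length / 2) []
        = colMark (g.length / 2) s (g[g.length / 2]'hmid) := by
      rw [pv_getD_lt _ _ _ (by simpa using hmid), List.getElem_mapIdx]
    rw [hg1, pv_mid_row g.length s (g[g.length / 2]'hmid)]
    apply List.ext_getElem (by simp [specG])
    intro i h1 h2
    have hil : i < g.length := by simpa [specG] using h2
    simp only [specG, List.getElem_mapIdx]
    by_cases hi : g.length / 2 = i
    · subst hi
      rw [List.getElem_set_self (by simpa using hmid)]
    · rw [List.getElem_set_ne hi _, List.getElem_mapIdx,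
        pv_colMark_row g.length s i (g[i]'hil) (fun hc => hi hc.symm)]

-- ===== VERDICT (by name: the statement is the Claim_ definition above) =====
theorem getEmptyGraph_spec : Claim_equal_getEmptyGraph := by
  intro g s _
  unfold Spec_getEmptyGraph
  rw [pv_A_eq_spec, pv_B_eq_spec]
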